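-- pv_equiv track=rewrite | github.com/ayushmansp0114-cmyk/soulcare | core/mental_health_analyzer.py | analyze_mental_health_text
-- ===== SOURCE A (Python) =====
-- MENTAL_HEALTH_KEYWORDS = {
--     'critical': ['suicide', 'kill myself', 'end my life', 'want to die', 'no reason to live', 'better off dead'],
--     'high': ['self harm', 'cutting', 'hurt myself', 'suicidal', 'hopeless', 'worthless', 'can\'t take it'],
--     'medium': ['depressed', 'depression', 'anxiety', 'panic attack', 'stressed out', 'overwhelming', 'breakdown'],
--     'low': ['worried', 'anxious', 'pressure', 'stressed', 'sad', 'upset', 'struggling', 'difficult'],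
-- }
--
-- def analyze_mental_health_text(text):
--     '''
--     Analyzes text for mental health keywords
--     Returns: (severity, detected_keywords)
--     '''
--     text_lower = text.lower()
--     detected = []
--     severity = None
--
--     # Check critical keywords first
--     for level in ['critical', 'high', 'medium', 'low']:
--         for keyword in MENTAL_HEALTH_KEYWORDS[level]:
--             if keyword in text_lower:
--                 detected.append(keyword)
--                 if not severity:
--                     severity = level
--
--     return severity, detected
-- ===== SOURCE B (Python) =====
-- MENTAL_HEALTH_KEYWORDS = {
--     'critical': ['suicide', 'kill myself', 'end my life', 'want to die', 'no reason to live', 'better off dead'],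
--     'high': ['self harm', 'cutting', 'hurt myself', 'suicidal', 'hopeless', 'worthless', 'can\'t take it'],
--     'medium': ['depressed', 'depression', 'anxiety', 'panic attack', 'stressed out', 'overwhelming', 'breakdown'],
--     'low': ['worried', 'anxious', 'pressure', 'stressed', 'sad', 'upset', 'struggling', 'difficult'],
-- }
--
-- _FLAT = [(level, kw) for level in ['critical', 'high', 'medium', 'low']
--          for kw in MENTAL_HEALTH_KEYWORDS[level]]
--
-- def analyze_mental_health_text(text):
--     # Text-driven matching: slide over every start position of the text and
--     # collect the keywords that begin there; then read results off the set.
--     t = text.lower()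
--     matched = set()
--     for i in range(len(t) + 1):
--         matched.update(kw for (_lvl, kw) in _FLAT if t.startswith(kw, i))
--     detected = [kw for (_lvl, kw) in _FLAT if kw in matched]
--     for lvl, kw in _FLAT:
--         if kw in matched:
--             return lvl, detected
--     return None, detected
-- ===== Notes on version B (the rewrite author's own statement) =====
-- stated objective: alternative
-- what changed: B inverts the traversal: instead of A's keyword-driven scan testing each keyword for substring occurrence in the text, B slides over every start position of the lowered text, collecting into a set the keywords that begin at that position (naive multi-pattern matching), and then derives the detected list and the severity by set-membership passes over the priority-ordered keyword table.
import Mathlib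
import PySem

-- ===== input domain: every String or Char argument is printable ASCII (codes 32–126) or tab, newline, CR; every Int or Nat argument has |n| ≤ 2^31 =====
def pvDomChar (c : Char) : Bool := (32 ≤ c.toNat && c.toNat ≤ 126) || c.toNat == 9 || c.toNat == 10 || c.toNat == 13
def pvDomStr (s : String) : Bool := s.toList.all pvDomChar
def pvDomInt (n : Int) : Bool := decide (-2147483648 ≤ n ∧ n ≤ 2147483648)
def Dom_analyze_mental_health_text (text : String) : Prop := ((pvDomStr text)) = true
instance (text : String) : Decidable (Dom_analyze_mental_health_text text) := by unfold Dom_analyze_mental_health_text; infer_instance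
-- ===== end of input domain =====

-- B inverts the traversal: a position-driven scan of the text collecting matching keywords into a set,
-- then detected/severity read off by membership (objective: alternative decomposition).


-- ===== PORT A =====
def MENTAL_HEALTH_KEYWORDS : PySem.Dict String (List String) := PySem.Dict.ofList
  [ ("critical", ["suicide", "kill myself", "end my life", "want to die", "no reason to live", "better off dead"]),
    ("high", ["self harm", "cutting", "hurt myself", "suicidal", "hopeless", "worthless", "can't take it"]),
    ("medium", ["depressed", "depression", "anxiety", "panic attack", "stressed out", "overwhelming", "breakdown"]),
    ("low", ["worried", "anxious", "pressure", "stressed", "sad", "upset", "struggling", "difficult"]) ]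

def analyze_mental_health_text (text : String) : Option String × List String :=
  let text_lower := PySem.Str.lower text
  let st :=
    (["critical", "high", "medium", "low"]).foldl (fun st level =>
      (MENTAL_HEALTH_KEYWORDS.getD level []).foldl (fun (st : Option String × List String) keyword =>
        if PySem.Str.isIn keyword text_lower then
          -- 'if not severity': severity is only ever None or a nonempty level name, so 'st.1 = none' is exact
          ((if st.1 = none then some level else st.1), st.2 ++ [keyword])
        else st) st) (none, [])
  (st.1, st.2)

-- ===== PORT B =====
-- _FLAT: the (level, keyword) pairs in priority order (precomputed in Source B)
def pvFlat : List (String × String) :=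
  [ ("critical", "suicide"), ("critical", "kill myself"), ("critical", "end my life"),
    ("critical", "want to die"), ("critical", "no reason to live"), ("critical", "better off dead"),
    ("high", "self harm"), ("high", "cutting"), ("high", "hurt myself"), ("high", "suicidal"),
    ("high", "hopeless"), ("high", "worthless"), ("high", "can't take it"),
    ("medium", "depressed"), ("medium", "depression"), ("medium", "anxiety"), ("medium", "panic attack"),
    ("medium", "stressed out"), ("medium", "overwhelming"), ("medium", "breakdown"),
    ("low", "worried"), ("low", "anxious"), ("low", "pressure"), ("low", "stressed"),
    ("low", "sad"), ("low", "upset"), ("low", "struggling"), ("low", "difficult") ]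

-- the position loop: for i in range(len(t)+1): matched.update(kw for (_lvl, kw) in _FLAT if t.startswith(kw, i))
-- t.startswith(kw, i) with 0 ≤ i ≤ len(t) is exactly 'kw is a prefix of t[i:]'
def pvMatched (t : List Char) : PySem.Set String :=
  (List.range (t.length + 1)).foldl
    (fun m i => PySem.Set.update m ((pvFlat.filter (fun p => p.2.toList.isPrefixOf (t.drop i))).map Prod.snd))
    PySem.Set.empty

-- the final loop: for lvl, kw in _FLAT: if kw in matched: return lvl  (falls through to None)
def pvFirstLevel : List (String × String) → PySem.Set String → Option String
  | [], _ => none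
  | p :: rest, m => if PySem.Set.contains m p.2 then some p.1 else pvFirstLevel rest m

def analyze_mental_health_text_alt (text : String) : Option String × List String :=
  let t := PySem.Str.lower text
  let matched := pvMatched t.toList
  let detected := (pvFlat.filter (fun p => PySem.Set.contains matched p.2)).map Prod.snd
  (pvFirstLevel pvFlat matched, detected)

-- ===== PRECONDITION & SPEC =====
def Spec_analyze_mental_health_text (text : String) (out : Option String × List String) : Prop := out = analyze_mental_health_text_alt text
instance (text : String) (out : Option String × List String) : Decidable (Spec_analyze_mental_health_text text out) := by unfold Spec_analyze_mental_health_text; infer_instance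

-- ===== CLAIM (what is proved, stated in full; the proofs are below) =====
def Claim_equal_analyze_mental_health_text : Prop := ∀ (text : String), Dom_analyze_mental_health_text text → Spec_analyze_mental_health_text text (analyze_mental_health_text text)

-- ===== LEMMAS AND PROOFS =====

-- A's nested fold over levels equals the flat fold over (level, keyword) pairs.
lemma nested_eq_flat (t : String) (levels : List String) (g : String → List String)
    (init : Option String × List String) :
    levels.foldl (fun st level => (g level).foldl (fun (st : Option String × List String) keyword =>
        if PySem.Str.isIn keyword t then ((if st.1 = none then some level else st.1), st.2 ++ [keyword]) else st) st) init
    = (levels.flatMap (fun level => (g level).map (fun kw => (level, kw)))).foldl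
        (fun (st : Option String × List String) p =>
          if PySem.Str.isIn p.2 t then ((if st.1 = none then some p.1 else st.1), st.2 ++ [p.2]) else st) init := by
  induction levels generalizing init with
  | nil => rfl
  | cons l ls ih =>
    simp only [List.foldl_cons, List.flatMap_cons, List.foldl_append, List.foldl_map, ih]

lemma flat_is_flatMap :
    (["critical", "high", "medium", "low"]).flatMap
      (fun level => (MENTAL_HEALTH_KEYWORDS.getD level []).map (fun kw => (level, kw))) = pvFlat := by
  decide

-- characterisation of A's flat fold, for an arbitrary predicate
lemma flat_fold_gen (q : String × String → Bool) (pairs : List (String × String)) (sev : Option String) (acc : List String) :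
    pairs.foldl (fun (st : Option String × List String) p =>
        if q p then ((if st.1 = none then some p.1 else st.1), st.2 ++ [p.2]) else st)
      (sev, acc)
    = ((match sev with
        | some s => some s
        | none => ((pairs.filter q).head?.map (fun p => p.1))),
       acc ++ (pairs.filter q).map (fun p => p.2)) := by
  induction pairs generalizing sev acc with
  | nil => cases sev <;> simp
  | cons p rest ih =>
    by_cases h : q p = true
    · cases sev <;> simp [h, ih]
    · cases sev <;> simp [h, ih]

-- membership across a fold of Set.update steps
lemma mem_foldl_update {α β : Type} [BEq β] [LawfulBEq β] (l : List α) (f : α → List β)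
    (s : PySem.Set β) (y : β) :
    (y ∈ l.foldl (fun m a => PySem.Set.update m (f a)) s) ↔ y ∈ s ∨ ∃ a ∈ l, y ∈ f a := by
  induction l generalizing s with
  | nil => simp
  | cons a rest ih =>
    simp only [List.foldl_cons, ih, PySem.Set.mem_update, List.mem_cons]
    constructor
    · rintro ((h | h) | ⟨b, hb, hy⟩)
      · exact Or.inl h
      · exact Or.inr ⟨a, Or.inl rfl, h⟩
      · exact Or.inr ⟨b, Or.inr hb, hy⟩
    · rintro (h | ⟨b, rfl | hb, hy⟩)
      · exact Or.inl (Or.inl h)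
      · exact Or.inl (Or.inr hy)
      · exact Or.inr ⟨b, hb, hy⟩

lemma mem_pvMatched (t : List Char) (y : String) :
    y ∈ pvMatched t ↔ ∃ i ≤ t.length, ∃ p ∈ pvFlat, p.2 = y ∧ p.2.toList.isPrefixOf (t.drop i) := by
  unfold pvMatched
  rw [mem_foldl_update]
  simp only [PySem.Set.empty, List.not_mem_nil, false_or, List.mem_range, List.mem_map,
    List.mem_filter, Nat.lt_succ_iff]
  constructor
  · rintro ⟨i, hi, p, ⟨hp, hpre⟩, rfl⟩
    exact ⟨i, hi, p, hp, rfl, hpre⟩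
  · rintro ⟨i, hi, p, hp, rfl, hpre⟩
    exact ⟨i, hi, p, ⟨hp, hpre⟩, rfl⟩

-- the set built by the position scan contains a keyword exactly when A's substring test fires
lemma contains_matched_eq_isIn (tl : String) (p : String × String) (hp : p ∈ pvFlat) :
    PySem.Set.contains (pvMatched tl.toList) p.2 = PySem.Str.isIn p.2 tl := by
  rw [PySem.Str.isIn_eq]
  by_cases h : PySem.Chars.isIn p.2.toList tl.toList = true
  · rw [h]
    have ⟨j, hj⟩ := (PySem.Chars.exists_prefix_drop_iff_isIn (sub := p.2.toList) (s := tl.toList)).mpr h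
    have hpre : p.2.toList <+: tl.toList.drop (min j tl.toList.length) := by
      by_cases hle : j ≤ tl.toList.length
      · rwa [min_eq_left hle]
      · rw [min_eq_right (le_of_not_ge hle), List.drop_length]
        rwa [List.drop_eq_nil_of_le (le_of_not_ge hle)] at hj
    have hmem : p.2 ∈ pvMatched tl.toList := by
      rw [mem_pvMatched]
      exact ⟨min j tl.toList.length, min_le_right _ _, p, hp, rfl,
        (List.isPrefixOf_iff_prefix).mpr hpre⟩
    exact (PySem.Set.contains_iff _ _).mpr hmem
  · have h' : PySem.Chars.isIn p.2.toList tl.toList = false := by simpa using h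
    rw [h']
    by_contra hc
    have hct : PySem.Set.contains (pvMatched tl.toList) p.2 = true := by
      revert hc; cases PySem.Set.contains (pvMatched tl.toList) p.2 <;> simp
    have hmem := (PySem.Set.contains_iff _ _).mp hct
    rw [mem_pvMatched] at hmem
    obtain ⟨i, hi, q, hq, hq2, hqpre⟩ := hmem
    have : PySem.Chars.isIn p.2.toList tl.toList = true := by
      refine (PySem.Chars.exists_prefix_drop_iff_isIn _ _).mp ⟨i, ?_⟩
      have := (List.isPrefixOf_iff_prefix).mp hqpre
      rwa [hq2] at this
    rw [this] at h'; exact Bool.noConfusion h'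

-- the final early-return loop computes the level of the first matched pair
lemma firstLevel_eq_head (l : List (String × String)) (m : PySem.Set String) :
    pvFirstLevel l m = ((l.filter (fun p => PySem.Set.contains m p.2)).head?).map Prod.fst := by
  induction l with
  | nil => rfl
  | cons p rest ih =>
    by_cases hm : p.2 ∈ m
    · simp [pvFirstLevel, hm]
    · simp [pvFirstLevel, hm, ih]

-- ===== VERDICT (by name: the statement is the Claim_ definition above) =====
theorem analyze_mental_health_text_spec : Claim_equal_analyze_mental_health_text := by
  intro text _
  show analyze_mental_health_text text = analyze_mental_health_text_alt text
  simp only [analyze_mental_health_text, analyze_mental_health_text_alt]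
  rw [nested_eq_flat, flat_is_flatMap, flat_fold_gen, firstLevel_eq_head]
  have hfilter : pvFlat.filter (fun p => PySem.Set.contains (pvMatched (PySem.Str.lower text).toList) p.2)
      = pvFlat.filter (fun p => PySem.Str.isIn p.2 (PySem.Str.lower text)) :=
    List.filter_congr (fun p hp => by rw [contains_matched_eq_isIn _ _ hp])
  rw [hfilter]
  cases hf : (pvFlat.filter (fun p => PySem.Str.isIn p.2 (PySem.Str.lower text))) with
  | nil => simp
  | cons p rest => simp
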